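-- pv_equiv track=rewrite | github.com/yyahiaali/Historic_Cos_DB | Data_Extraction_Tabulation.py | add_consecutive_numbers
-- ===== SOURCE A (Python) =====
-- def add_consecutive_numbers(levels):
--    result = []
--    consecutive_count = 0
--    for level in levels:
--        if level == "L3":
--            consecutive_count += 1
--            if consecutive_count > 3:
--                result.append("L3")
--            else:
--                result.append(f"L3.{consecutive_count}")
--        else:
--            consecutive_count = 0
--            result.append(level)
--    return result
-- ===== SOURCE B (Python) =====
-- def add_consecutive_numbers(levels):
--     result = []
--     i = 0
--     n = len(levels)
--     while i < n:
--         j = i + 1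
--         while j < n and levels[j] == levels[i]:
--             j += 1
--         if levels[i] == "L3":
--             for k in range(1, j - i + 1):
--                 result.append(f"L3.{k}" if k <= 3 else "L3")
--         else:
--             result.extend(levels[i:j])
--         i = j
--     return result
-- ===== Notes on version B (the rewrite author's own statement) =====
-- stated objective: alternative
-- what changed: B first finds each maximal run of equal adjacent values and then labels a whole L3 run at once (L3.1..L3.3, then plain L3), instead of A's flat loop threading a consecutive counter through every element.
import Mathlib
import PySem

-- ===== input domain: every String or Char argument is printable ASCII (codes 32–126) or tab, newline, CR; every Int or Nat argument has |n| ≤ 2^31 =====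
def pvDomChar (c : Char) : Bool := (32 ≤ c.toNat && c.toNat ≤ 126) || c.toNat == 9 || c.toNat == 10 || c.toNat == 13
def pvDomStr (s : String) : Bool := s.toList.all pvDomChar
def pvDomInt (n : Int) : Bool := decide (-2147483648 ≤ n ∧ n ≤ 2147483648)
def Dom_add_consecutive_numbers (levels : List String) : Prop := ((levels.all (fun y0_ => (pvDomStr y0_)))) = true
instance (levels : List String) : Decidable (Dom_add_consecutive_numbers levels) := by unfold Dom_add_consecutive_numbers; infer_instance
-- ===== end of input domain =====

-- B labels whole maximal runs at once instead of threading a counter; return-value equivalence, no speed claim.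


-- ===== PORT A =====
def aStep (st : List String × Int) (level : String) : List String × Int :=
  if level == "L3" then
    let c := st.2 + 1
    if c > 3 then (st.1 ++ ["L3"], c)
    else (st.1 ++ ["L3." ++ PySem.Int.toStr c], c)
  else (st.1 ++ [level], 0)

def add_consecutive_numbers (levels : List String) : List String :=
  (levels.foldl aStep ([], 0)).1

-- ===== PORT B =====
-- run = the rest of the maximal run starting at the head (B's inner while);
-- an L3 run of length n is labelled k = 1..n, L3.k for k ≤ 3 else L3.
def add_consecutive_numbers_alt : List String → List String
  | [] => []
  | x :: xs =>
    let run := xs.takeWhile (fun y => y == x)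
    let block := if x == "L3" then
        (List.range (run.length + 1)).map
          (fun (k : Nat) => if ((k : Int) + 1) ≤ 3 then "L3." ++ PySem.Int.toStr ((k : Int) + 1) else "L3")
      else x :: run
    block ++ add_consecutive_numbers_alt (xs.dropWhile (fun y => y == x))
  termination_by l => l.length
  decreasing_by
    simp only [List.length_cons]
    exact Nat.lt_succ_of_le (List.length_dropWhile_le _ _)

-- ===== PRECONDITION & SPEC =====
def Spec_add_consecutive_numbers (levels : List String) (out : List String) : Prop := out = add_consecutive_numbers_alt levels
instance (levels : List String) (out : List String) : Decidable (Spec_add_consecutive_numbers levels out) := by unfold Spec_add_consecutive_numbers; infer_instance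

-- ===== CLAIM (what is proved, stated in full; the proofs are below) =====
def Claim_equal_add_consecutive_numbers : Prop := ∀ (levels : List String), Dom_add_consecutive_numbers levels → Spec_add_consecutive_numbers levels (add_consecutive_numbers levels)

-- ===== LEMMAS AND PROOFS =====

-- Recursive characterisation of A's fold.
def aRec (c : Int) : List String → List String
  | [] => []
  | l :: ls =>
    if l == "L3" then
      (if c + 1 > 3 then "L3" else "L3." ++ PySem.Int.toStr (c + 1)) :: aRec (c + 1) ls
    else l :: aRec 0 ls

-- labels an L3 run of length n whose first element is the (c+1)-st consecutive L3
def labelsFrom (c : Int) : Nat → List String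
  | 0 => []
  | n + 1 => (if c + 1 > 3 then "L3" else "L3." ++ PySem.Int.toStr (c + 1)) :: labelsFrom (c + 1) n

theorem aRec_foldl (ls : List String) : ∀ (acc : List String) (c : Int),
    (ls.foldl aStep (acc, c)).1 = acc ++ aRec c ls := by
  induction ls with
  | nil => intro acc c; simp [aRec]
  | cons l ls ih =>
    intro acc c
    rw [List.foldl_cons]
    by_cases h : l = "L3"
    · subst h
      by_cases h3 : c + 1 > 3
      · rw [show aStep (acc, c) "L3" = (acc ++ ["L3"], c + 1) from by simp [aStep, h3]]
        rw [ih]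
        simp [aRec, h3]
      · rw [show aStep (acc, c) "L3" = (acc ++ ["L3." ++ PySem.Int.toStr (c + 1)], c + 1) from by
          simp [aStep, h3]]
        rw [ih]
        simp [aRec, h3]
    · rw [show aStep (acc, c) l = (acc ++ [l], 0) from by simp [aStep, h]]
      rw [ih]
      simp [aRec, h]

-- non-L3 run passes through unchanged
theorem aRec_pass (t : List String) (x : String) (hx : x ≠ "L3")
    (ht : ∀ y ∈ t, y = x) (d : List String) :
    aRec 0 (t ++ d) = t ++ aRec 0 d := by
  induction t with
  | nil => rfl
  | cons y ys ih =>
    have hy : y = x := ht y (by simp)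
    simp only [List.cons_append, aRec]
    rw [if_neg (by simp [hy, hx])]
    rw [ih (fun z hz => ht z (by simp [hz]))]

-- an L3 run starting at count c, followed by d whose head is not "L3"
theorem aRec_run (t : List String) (ht : ∀ y ∈ t, y = "L3") :
    ∀ (c : Int) (d : List String), d.head? ≠ some "L3" →
    aRec c (t ++ d) = labelsFrom c t.length ++ aRec 0 d := by
  induction t with
  | nil =>
    intro c d hd
    cases d with
    | nil => rfl
    | cons y ys =>
      have hy : y ≠ "L3" := by simpa using hd
      simp [aRec, labelsFrom, hy]
  | cons y ys ih =>
    intro c d hd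
    have hy : y = "L3" := ht y (by simp)
    subst hy
    rw [show ("L3" :: ys) ++ d = "L3" :: (ys ++ d) from rfl]
    rw [show aRec c ("L3" :: (ys ++ d))
          = (if c + 1 > 3 then "L3" else "L3." ++ PySem.Int.toStr (c + 1)) :: aRec (c + 1) (ys ++ d) from by
      simp [aRec]]
    rw [ih (fun z hz => ht z (by simp [hz])) (c + 1) d hd]
    rfl

theorem labelsFrom_eq (n : Nat) : ∀ c : Int,
    labelsFrom c n = (List.range n).map
      (fun (k : Nat) => if c + (k : Int) + 1 > 3 then "L3" else "L3." ++ PySem.Int.toStr (c + (k : Int) + 1)) := by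
  induction n with
  | zero => intro c; rfl
  | succ n ih =>
    intro c
    rw [labelsFrom, List.range_succ_eq_map, List.map_cons, List.map_map, ih (c + 1)]
    congr 1
    · norm_num
    · apply List.map_congr_left
      intro a _
      have h1 : c + ((a.succ : Nat) : Int) + 1 = c + 1 + (a : Int) + 1 := by push_cast; ring
      simp only [Function.comp_apply, h1]

theorem labelsFrom_zero (n : Nat) :
    labelsFrom 0 n = (List.range n).map
      (fun (k : Nat) => if ((k : Int) + 1) ≤ 3 then "L3." ++ PySem.Int.toStr ((k : Int) + 1) else "L3") := by
  rw [labelsFrom_eq]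
  apply List.map_congr_left
  intro k _
  simp only [zero_add]
  by_cases hk : (k : Int) + 1 ≤ 3
  · rw [if_neg (by omega), if_pos hk]
  · rw [if_pos (by omega), if_neg hk]

theorem head?_dropWhile_ne (p : String → Bool) (l : List String) :
    ∀ y, (l.dropWhile p).head? = some y → p y = false := by
  induction l with
  | nil => intro y h; simp at h
  | cons a as ih =>
    intro y h
    by_cases ha : p a
    · exact ih y (by simpa [List.dropWhile, ha] using h)
    · simp [List.dropWhile, ha] at h
      subst h; simpa using ha

theorem aRec_eq_alt (ls : List String) : aRec 0 ls = add_consecutive_numbers_alt ls := by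
  induction ls using add_consecutive_numbers_alt.induct with
  | case1 => rw [add_consecutive_numbers_alt]; rfl
  | case2 x xs ih =>
    have hrun : ∀ y ∈ xs.takeWhile (fun y => y == x), y = x := by
      intro y hy
      have := List.mem_takeWhile_imp hy
      simpa using this
    have hsplit : xs = xs.takeWhile (fun y => y == x) ++ xs.dropWhile (fun y => y == x) :=
      (List.takeWhile_append_dropWhile).symm
    rw [add_consecutive_numbers_alt]
    by_cases hx : x = "L3"
    · subst hx
      have hd : (xs.dropWhile (fun y => y == "L3")).head? ≠ some "L3" := by
        intro h
        have := head?_dropWhile_ne (fun y => y == "L3") xs _ h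
        simp at this
      have hall : ∀ y ∈ ("L3" :: xs.takeWhile (fun y => y == "L3")), y = "L3" := by
        intro y hy
        rcases List.mem_cons.mp hy with h | h
        · exact h
        · exact hrun y h
      conv_lhs => rw [hsplit, ← List.cons_append]
      rw [aRec_run _ hall 0 _ hd, ih]
      simp only [List.length_cons, labelsFrom_zero]
      rw [if_pos (by simp)]
    · conv_lhs => rw [hsplit]
      rw [show aRec 0 (x :: (xs.takeWhile (fun y => y == x) ++ xs.dropWhile (fun y => y == x)))
            = x :: aRec 0 (xs.takeWhile (fun y => y == x) ++ xs.dropWhile (fun y => y == x)) from by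
        simp only [aRec]; rw [if_neg (by simp [hx])]]
      rw [aRec_pass _ x hx hrun, ih]
      rw [if_neg (by simp [hx])]
      simp

-- ===== VERDICT (by name: the statement is the Claim_ definition above) =====
theorem add_consecutive_numbers_spec : Claim_equal_add_consecutive_numbers := by
  intro levels _
  unfold Spec_add_consecutive_numbers add_consecutive_numbers
  rw [aRec_foldl levels [] 0, List.nil_append, aRec_eq_alt]
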